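-- pv_equiv track=rewrite | github.com/AGNMZ/mis_ejercicios_python_unsam | Clase02/diccionario_geringoso.py | geringosear
-- ===== SOURCE A (Python) =====
-- def geringosear(cadena):
-- 	cadena = cadena.lower()
-- 	capadepenapa = ''
-- 	for c in cadena:
-- 		if c in 'aeiou':
-- 			capadepenapa = capadepenapa + c + 'p' + c
-- 		else:
-- 			capadepenapa = capadepenapa + c
-- 	return capadepenapa
-- ===== SOURCE B (Python) =====
-- def geringosear(cadena):
--     cadena = cadena.lower()
--     for v in 'aeiou':
--         cadena = cadena.replace(v, v + 'p' + v)
--     return cadena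
-- ===== Notes on version B (the rewrite author's own statement) =====
-- stated objective: faster
-- what changed: Replaces A's single per-character accumulation loop with five whole-string str.replace passes (one per vowel) after lowercasing; correct because the inserted consonant is not a vowel and later passes never reprocess earlier insertions.
import Mathlib
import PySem

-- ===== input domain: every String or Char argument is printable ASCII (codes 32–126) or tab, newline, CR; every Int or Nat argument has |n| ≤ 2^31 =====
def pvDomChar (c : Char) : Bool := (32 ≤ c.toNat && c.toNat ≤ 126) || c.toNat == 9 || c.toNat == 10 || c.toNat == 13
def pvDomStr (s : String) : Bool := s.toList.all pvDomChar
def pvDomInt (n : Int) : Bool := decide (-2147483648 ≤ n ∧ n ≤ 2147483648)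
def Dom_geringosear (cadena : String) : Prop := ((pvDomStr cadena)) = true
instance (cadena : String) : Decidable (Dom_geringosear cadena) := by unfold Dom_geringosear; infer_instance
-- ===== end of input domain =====

-- B replaces A's single per-character accumulation pass with five whole-string
-- replace passes, one per vowel (measurably faster in CPython; same exact output).

-- ===== PORT A =====
-- A: lowercase, then one pass over the characters, appending c+'p'+c for vowels, c otherwise.
def geringosear (cadena : String) : String :=
  let cadena := PySem.Str.lower cadena
  String.ofList (cadena.toList.foldl
    (fun capadepenapa c =>
      if PySem.Chars.isIn [c] "aeiou".toList then capadepenapa ++ [c, 'p', c]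
      else capadepenapa ++ [c]) [])

-- ===== PORT B =====
-- B: lowercase, then for each vowel v replace v by v+'p'+v in the whole string.
def geringosear_alt (cadena : String) : String :=
  let cadena := PySem.Str.lower cadena
  "aeiou".toList.foldl
    (fun s v => PySem.Str.replace s (String.ofList [v]) (String.ofList [v, 'p', v])) cadena

-- ===== PRECONDITION & SPEC =====
def Spec_geringosear (cadena : String) (out : String) : Prop := out = geringosear_alt cadena
instance (cadena : String) (out : String) : Decidable (Spec_geringosear cadena out) := by unfold Spec_geringosear; infer_instance

-- ===== CLAIM (what is proved, stated in full; the proofs are below) =====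
def Claim_equal_geringosear : Prop := ∀ (cadena : String), Dom_geringosear cadena → Spec_geringosear cadena (geringosear cadena)

-- ===== LEMMAS AND PROOFS =====

-- the per-character expansion once the vowels of V have been processed
def pvStep (V : List Char) (c : Char) : List Char :=
  if c ∈ V then [c, 'p', c] else [c]

-- A's accumulator loop is a flatMap
theorem pvA_foldl (l : List Char) (acc : List Char) :
    l.foldl (fun capadepenapa c =>
      if PySem.Chars.isIn [c] "aeiou".toList then capadepenapa ++ [c, 'p', c]
      else capadepenapa ++ [c]) acc
    = acc ++ l.flatMap (pvStep "aeiou".toList) := by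
  induction l generalizing acc with
  | nil => simp
  | cons c t ih =>
    rw [List.foldl_cons, List.flatMap_cons, ih]
    have hiff : (PySem.Chars.isIn [c] "aeiou".toList = true) ↔ c ∈ "aeiou".toList := by
      rw [PySem.Chars.isIn_iff_infix, List.singleton_infix_iff]
    by_cases hm : c ∈ "aeiou".toList
    · rw [if_pos (hiff.mpr hm)]
      simp only [pvStep]
      rw [if_pos hm]
      simp
    · rw [if_neg (fun h => hm (hiff.mp h))]
      simp only [pvStep]
      rw [if_neg hm]
      simp

-- single-character replace is a flatMap
theorem pvReplace_go (v : Char) (r : List Char) (l acc : List Char) (fuel : Nat)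
    (h : l.length ≤ fuel) :
    PySem.Chars.replace.go [v] r fuel l acc
      = acc.reverse ++ l.flatMap (fun c => if c = v then r else [c]) := by
  induction l generalizing acc fuel with
  | nil => cases fuel <;> simp [PySem.Chars.replace.go]
  | cons c t ih =>
    cases fuel with
    | zero => simp at h
    | succ n =>
      simp only [List.length_cons, Nat.succ_le_succ_iff] at h
      by_cases hc : c = v
      · subst hc
        have hpJ : List.isPrefixOf [c] (c :: t) = true := by
          simp [List.isPrefixOf]
        simp only [PySem.Chars.replace.go, hpJ, if_true, List.length_cons,
          List.length_nil, List.drop_succ_cons, List.drop_zero]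
        rw [ih _ _ h]
        simp
      · have hpJ : List.isPrefixOf [v] (c :: t) = false := by
          simp [List.isPrefixOf]
          intro h'; exact absurd h'.symm hc
        simp only [PySem.Chars.replace.go, hpJ, Bool.false_eq_true, if_false]
        rw [ih _ _ h]
        simp [hc]

theorem pvReplace_single (v : Char) (r : List Char) (s : List Char) :
    PySem.Chars.replace s [v] r = s.flatMap (fun c => if c = v then r else [c]) := by
  rw [PySem.Chars.replace]
  simp only [List.isEmpty_cons, Bool.false_eq_true, if_false]
  exact pvReplace_go v r s [] s.length (le_refl _)

-- composing one more single-vowel replace extends the processed-vowel set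
theorem pvComp (V : List Char) (w : Char) (hw : w ∉ V) (hp : w ≠ 'p') (s : List Char) :
    (s.flatMap (pvStep V)).flatMap (fun c => if c = w then [w, 'p', w] else [c])
      = s.flatMap (pvStep (V ++ [w])) := by
  induction s with
  | nil => simp
  | cons c t ih =>
    simp only [List.flatMap_cons, List.flatMap_append, ih]
    congr 1
    by_cases hc : c ∈ V
    · have hcw : c ≠ w := fun h => hw (h ▸ hc)
      simp [pvStep, hc, hcw, Ne.symm hp]
    · by_cases hcw : c = w
      · subst hcw
        simp [pvStep, hc]
      · simp [pvStep, hc, hcw]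

-- B's five whole-string passes, at list level
theorem pvB_list (L : List Char) :
    (['a', 'e', 'i', 'o', 'u'].foldl
      (fun s v => PySem.Chars.replace s [v] [v, 'p', v]) L)
    = L.flatMap (pvStep ['a', 'e', 'i', 'o', 'u']) := by
  simp only [List.foldl_cons, List.foldl_nil, pvReplace_single]
  have e0 : L.flatMap (pvStep []) = L := by
    induction L with
    | nil => rfl
    | cons c t ih => simp [pvStep, ih]
  rw [← e0]
  rw [pvComp [] 'a' (by decide) (by decide)]
  simp only [List.nil_append]
  rw [pvComp ['a'] 'e' (by decide) (by decide)]
  simp only [List.cons_append, List.nil_append]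
  rw [pvComp ['a', 'e'] 'i' (by decide) (by decide)]
  simp only [List.cons_append, List.nil_append]
  rw [pvComp ['a', 'e', 'i'] 'o' (by decide) (by decide)]
  simp only [List.cons_append, List.nil_append]
  rw [pvComp ['a', 'e', 'i', 'o'] 'u' (by decide) (by decide)]
  simp only [List.cons_append, List.nil_append]
  rw [e0]

-- B's string-level foldl is its list-level foldl
theorem pvB_str (vs : List Char) (s : String) :
    vs.foldl (fun s v =>
      PySem.Str.replace s (String.ofList [v]) (String.ofList [v, 'p', v])) s
    = String.ofList (vs.foldl
      (fun l v => PySem.Chars.replace l [v] [v, 'p', v]) s.toList) := by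
  induction vs generalizing s with
  | nil => simp [String.ofList_toList]
  | cons v t ih =>
    rw [List.foldl_cons, List.foldl_cons,
      show PySem.Str.replace s (String.ofList [v]) (String.ofList [v, 'p', v])
          = String.ofList (PySem.Chars.replace s.toList [v] [v, 'p', v]) from by
        simp [PySem.Str.replace],
      ih]
    simp

-- ===== VERDICT (by name: the statement is the Claim_ definition above) =====
theorem geringosear_spec : Claim_equal_geringosear := by
  intro cadena _
  simp only [Spec_geringosear, geringosear, geringosear_alt]
  rw [pvB_str]
  refine congrArg String.ofList ?_
  rw [pvA_foldl, List.nil_append,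
      show "aeiou".toList = ['a', 'e', 'i', 'o', 'u'] by decide, pvB_list]
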